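-- pv_equiv track=rewrite | github.com/kirby44/biology | Python_for_Genomic_Data_Science/repeat_sequence_ver0.py | detect_repeat_per_remainder
-- ===== SOURCE A (Python) =====
-- def detect_repeat_per_remainder(indices,repeat_length,overlap,remainder):
--     mod = repeat_length - overlap
--     mod_group = [i for i in indices if i % mod == remainder]
--     if len(mod_group) < 2:
--         return 0,0
--     repeat_times_list = []
--     for i in range(len(mod_group) - 1):
--         k = 1
--         repeat_times = 1
--         while mod_group[i] + repeat_length * k == mod_group[i+k] and i+k < len(mod_group):
--             repeat_times += 1
--             k += 1
--             if i+k == len(mod_group):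
--                 repeat_times_list.append(repeat_times)
--                 break
--         else:
--             repeat_times_list.append(repeat_times)
--     if repeat_times_list == []:
--         return 0,0
--     max_repeat_times_per_remainder = max(repeat_times_list)
--     index_in_mod_group = repeat_times_list.index(max_repeat_times_per_remainder)
--     index = mod_group[index_in_mod_group]
--     return max_repeat_times_per_remainder,index
-- ===== SOURCE B (Python) =====
-- def detect_repeat_per_remainder(indices, repeat_length, overlap, remainder):
--     mod = repeat_length - overlap
--     group = [i for i in indices if i % mod == remainder]
--     n = len(group)
--     if n < 2:
--         return 0, 0
--     # single reverse pass: run = length of the arithmetic run (step repeat_length)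
--     # starting at i; keep the best, preferring the leftmost start on ties.
--     run = 1
--     best = 0
--     best_val = 0
--     for i in range(n - 2, -1, -1):
--         run = run + 1 if group[i + 1] - group[i] == repeat_length else 1
--         if run >= best:
--             best = run
--             best_val = group[i]
--     return best, best_val
-- ===== Notes on version B (the rewrite author's own statement) =====
-- stated objective: alternative
-- what changed: Replaces A's per-start rescan of each arithmetic run (nested while inside the for) plus the separate max()/index() passes by a single reverse pass that extends run lengths incrementally (run[i] = run[i+1]+1 when the next gap equals repeat_length) while tracking the best value and its leftmost start on the fly.
-- outside the precondition, e.g. on detect_repeat_per_remainder([0, 1, 2], 3, 3, 0): A raises ZeroDivisionError, B raises ZeroDivisionError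
import Mathlib
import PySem

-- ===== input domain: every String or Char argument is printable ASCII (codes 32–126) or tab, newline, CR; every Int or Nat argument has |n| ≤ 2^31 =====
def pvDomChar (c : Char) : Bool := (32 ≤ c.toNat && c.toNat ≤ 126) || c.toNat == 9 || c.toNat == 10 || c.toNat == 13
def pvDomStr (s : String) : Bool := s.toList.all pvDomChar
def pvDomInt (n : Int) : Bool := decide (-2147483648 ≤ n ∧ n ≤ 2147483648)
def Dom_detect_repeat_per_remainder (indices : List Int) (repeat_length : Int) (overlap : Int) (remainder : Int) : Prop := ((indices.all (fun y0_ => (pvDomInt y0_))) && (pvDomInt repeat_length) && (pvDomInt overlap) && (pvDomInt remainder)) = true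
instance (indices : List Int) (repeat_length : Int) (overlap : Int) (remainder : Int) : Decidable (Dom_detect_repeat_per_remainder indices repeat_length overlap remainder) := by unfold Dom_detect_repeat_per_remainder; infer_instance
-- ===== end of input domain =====

-- B replaces A's per-start while-loop rescans and separate max()/index() passes by
-- one reverse pass that extends run lengths incrementally and tracks the best
-- start on the fly (objective: alternative).

-- ===== PORT A =====
-- the inner while loop; the bound check i+k < len is written before the element
-- comparison (Python writes it second, but the loop's own break makes the
-- out-of-range access unreachable, so the order is observationally the same)
def pvWhileA (g : List Int) (L : Int) (i k : Nat) (rt : Int) : Int :=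
  if h : i + k < g.length ∧ g.getD i 0 + L * (k : Int) = g.getD (i + k) 0 then
    (if i + k + 1 = g.length then rt + 1 else pvWhileA g L i (k + 1) (rt + 1))
  else rt
termination_by g.length - (i + k)
decreasing_by omega

def detect_repeat_per_remainder (indices : List Int) (repeat_length : Int) (overlap : Int) (remainder : Int) : Int × Int :=
  let md := repeat_length - overlap
  let mod_group := indices.filter (fun i => PySem.Int.mod i md == remainder)
  if mod_group.length < 2 then (0, 0)
  else
    let repeat_times_list := (List.range (mod_group.length - 1)).foldl
      (fun acc i => acc ++ [pvWhileA mod_group repeat_length i 1 1]) []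
    if repeat_times_list = [] then (0, 0)
    else
      let m := (PySem.List.max? repeat_times_list (fun y => y)).getD 0
      let j := (PySem.List.index? repeat_times_list m).getD 0
      (m, mod_group.getD j 0)

-- ===== PORT B =====
-- loop body of Source B's reverse pass; state = (run, best, best_val)
def pvStepB (g : List Int) (L : Int) (s : Int × Int × Int) (i : Nat) : Int × Int × Int :=
  let run := if g.getD (i + 1) 0 - g.getD i 0 = L then s.1 + 1 else 1
  if run ≥ s.2.1 then (run, run, g.getD i 0) else (run, s.2.1, s.2.2)

def detect_repeat_per_remainder_alt (indices : List Int) (repeat_length : Int) (overlap : Int) (remainder : Int) : Int × Int :=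
  let md := repeat_length - overlap
  let group := indices.filter (fun i => PySem.Int.mod i md == remainder)
  if group.length < 2 then (0, 0)
  else
    -- for i in range(n-2, -1, -1)  ≡  fold over (List.range (n-1)).reverse
    let s := ((List.range (group.length - 1)).reverse).foldl (pvStepB group repeat_length) (1, 0, 0)
    (s.2.1, s.2.2)

-- ===== PRECONDITION & SPEC =====
-- Pre_ excludes only repeat_length = overlap, where Python's `i % 0` raises ZeroDivisionError.
def Pre_detect_repeat_per_remainder (indices : List Int) (repeat_length : Int) (overlap : Int) (remainder : Int) : Prop := repeat_length - overlap ≠ 0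
instance (indices : List Int) (repeat_length : Int) (overlap : Int) (remainder : Int) : Decidable (Pre_detect_repeat_per_remainder indices repeat_length overlap remainder) := by unfold Pre_detect_repeat_per_remainder; infer_instance

def pvWitness_detect_repeat_per_remainder : List Int × Int × Int × Int := ([0, 3, 6, 10], 3, 0, 0)

def Spec_detect_repeat_per_remainder (indices : List Int) (repeat_length : Int) (overlap : Int) (remainder : Int) (out : Int × Int) : Prop := out = detect_repeat_per_remainder_alt indices repeat_length overlap remainder
instance (indices : List Int) (repeat_length : Int) (overlap : Int) (remainder : Int) (out : Int × Int) : Decidable (Spec_detect_repeat_per_remainder indices repeat_length overlap remainder out) := by unfold Spec_detect_repeat_per_remainder; infer_instance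

-- ===== CLAIM (what is proved, stated in full; the proofs are below) =====
def Claim_equal_detect_repeat_per_remainder : Prop := ∀ (indices : List Int) (repeat_length : Int) (overlap : Int) (remainder : Int), Dom_detect_repeat_per_remainder indices repeat_length overlap remainder → Pre_detect_repeat_per_remainder indices repeat_length overlap remainder → Spec_detect_repeat_per_remainder indices repeat_length overlap remainder (detect_repeat_per_remainder indices repeat_length overlap remainder)

-- ===== LEMMAS AND PROOFS =====

-- run length of the step-L arithmetic run starting at j (common characterisation)
def pvRunFrom (g : List Int) (L : Int) (j : Nat) : Int :=
  if h : j + 1 < g.length then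
    (if g.getD (j + 1) 0 - g.getD j 0 = L then 1 + pvRunFrom g L (j + 1) else 1)
  else 1
termination_by g.length - j
decreasing_by omega

-- (max value, leftmost argmax) of f over [m, M)
def pvOver (f : Nat → Int) (M m : Nat) : Int × Nat :=
  if h : m + 1 < M then
    (if f m ≥ (pvOver f M (m + 1)).1 then (f m, m) else pvOver f M (m + 1))
  else (f m, m)
termination_by M - m
decreasing_by omega

theorem pvRunFrom_ge_one (g : List Int) (L : Int) (j : Nat) : 1 ≤ pvRunFrom g L j := by
  unfold pvRunFrom
  split
  · split
    · have := pvRunFrom_ge_one g L (j + 1); omega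
    · omega
  · omega
termination_by g.length - j
decreasing_by omega

theorem pvWhileA_eq (g : List Int) (L : Int) (i : Nat) :
    ∀ d k rt, g.length - (i + k) ≤ d →
      g.getD (i + k) 0 = g.getD i 0 + L * (k : Int) →
      pvWhileA g L i (k + 1) rt = rt - 1 + pvRunFrom g L (i + k) := by
  intro d
  induction d with
  | zero =>
      intro k rt hd hinv
      rw [pvWhileA, pvRunFrom]
      have h1 : ¬ (i + (k + 1) < g.length) := by omega
      have h2 : ¬ (i + k + 1 < g.length) := by omega
      rw [dif_neg (by omega), dif_neg h2]
      ring
  | succ d ih =>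
      intro k rt hd hinv
      rw [pvWhileA, pvRunFrom]
      by_cases hb : i + k + 1 < g.length
      · by_cases he : g.getD (i + k + 1) 0 - g.getD (i + k) 0 = L
        · have hcond : i + (k + 1) < g.length ∧
              g.getD i 0 + L * ((k + 1 : Nat) : Int) = g.getD (i + (k + 1)) 0 := by
            refine ⟨by omega, ?_⟩
            have : i + (k + 1) = i + k + 1 := by omega
            rw [this]
            push_cast
            rw [hinv] at he
            linarith
          rw [dif_pos hcond, dif_pos hb, if_pos he]
          by_cases hend : i + (k + 1) + 1 = g.length
          · rw [if_pos hend, pvRunFrom]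
            have : ¬ (i + k + 1 + 1 < g.length) := by omega
            rw [dif_neg this]
            ring
          · rw [if_neg hend]
            have := ih (k + 1) (rt + 1) (by omega)
              (by rw [hinv] at he; push_cast; have h' : i + (k + 1) = i + k + 1 := by omega
                  rw [h']; linarith)
            have h' : i + (k + 1) = i + k + 1 := by omega
            rw [h'] at this
            rw [this]
            ring
        · have hcond : ¬ (i + (k + 1) < g.length ∧
              g.getD i 0 + L * ((k + 1 : Nat) : Int) = g.getD (i + (k + 1)) 0) := by
            intro ⟨_, hc⟩
            apply he
            have h' : i + (k + 1) = i + k + 1 := by omega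
            rw [h'] at hc
            rw [hinv]
            push_cast at hc
            linarith
          rw [dif_neg hcond, dif_pos hb, if_neg he]
          ring
      · rw [dif_neg (by omega), dif_neg hb]
        ring

theorem pvWhileA_one (g : List Int) (L : Int) (i : Nat) :
    pvWhileA g L i 1 1 = pvRunFrom g L i := by
  have := pvWhileA_eq g L i (g.length) 0 1 (by omega) (by simp)
  simpa using this

theorem foldl_append_map (f : Nat → Int) (l : List Nat) (a : List Int) :
    l.foldl (fun acc i => acc ++ [f i]) a = a ++ l.map f := by
  induction l generalizing a with
  | nil => simp
  | cons x t ih => simp [List.foldl, ih]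

theorem pvOver_props (f : Nat → Int) (M : Nat) :
    ∀ m, m < M →
      m ≤ (pvOver f M m).2 ∧ (pvOver f M m).2 < M ∧
      f (pvOver f M m).2 = (pvOver f M m).1 ∧
      (∀ j, m ≤ j → j < M → f j ≤ (pvOver f M m).1) ∧
      (∀ j, m ≤ j → j < (pvOver f M m).2 → f j < (pvOver f M m).1) := by
  intro m
  induction hm : M - m using Nat.strong_induction_on generalizing m with
  | _ d ih =>
    intro hmM
    rw [pvOver]
    by_cases h : m + 1 < M
    · obtain ⟨ha, hb, hc, hd, he⟩ := ih (M - (m + 1)) (by omega) (m + 1) rfl (by omega)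
      rw [dif_pos h]
      by_cases hge : f m ≥ (pvOver f M (m + 1)).1
      · rw [if_pos hge]
        refine ⟨le_refl m, hmM, rfl, ?_, ?_⟩
        · intro j hj1 hj2
          rcases Nat.eq_or_lt_of_le hj1 with rfl | hlt
          · exact le_refl _
          · exact le_trans (hd j (by omega) hj2) hge
        · intro j hj1 hj2; omega
      · rw [if_neg hge]
        refine ⟨by omega, hb, hc, ?_, ?_⟩
        · intro j hj1 hj2
          rcases Nat.eq_or_lt_of_le hj1 with rfl | hlt
          · omega
          · exact hd j (by omega) hj2
        · intro j hj1 hj2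
          rcases Nat.eq_or_lt_of_le hj1 with rfl | hlt
          · omega
          · exact he j (by omega) hj2
    · rw [dif_neg h]
      refine ⟨le_refl m, hmM, rfl, ?_, ?_⟩
      · intro j hj1 hj2
        have : j = m := by omega
        subst this; exact le_refl _
      · intro j hj1 hj2; omega

theorem index?_intro (l : List Int) (v : Int) :
    ∀ k (hk : k < l.length), l[k] = v → (∀ j (hj : j < k), l[j]'(by omega) ≠ v) →
      PySem.List.index? l v = some k := by
  induction l with
  | nil => intro k hk; simp at hk
  | cons x t ih =>
    intro k hk h1 h2
    cases k with
    | zero =>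
      simp at h1
      subst h1
      exact PySem.List.index?_cons_self x t
    | succ k' =>
      have hx : x ≠ v := by
        have := h2 0 (by omega)
        simpa using this
      rw [PySem.List.index?_cons_of_ne t hx]
      have := ih k' (by simpa using hk) (by simpa using h1)
        (fun j hj => by have := h2 (j + 1) (by omega); simpa using this)
      rw [this]
      rfl

-- B's fold invariant: after processing indices m-1 … 0 from the invariant state
-- at m, the state is the invariant state at 0.
theorem foldB_inv (g : List Int) (L : Int) (hn : 2 ≤ g.length) :
    ∀ m, m ≤ g.length - 2 →
      ((List.range m).reverse).foldl (pvStepB g L)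
        (pvRunFrom g L m, (pvOver (pvRunFrom g L) (g.length - 1) m).1,
          g.getD (pvOver (pvRunFrom g L) (g.length - 1) m).2 0)
      = (pvRunFrom g L 0, (pvOver (pvRunFrom g L) (g.length - 1) 0).1,
          g.getD (pvOver (pvRunFrom g L) (g.length - 1) 0).2 0) := by
  intro m
  induction m with
  | zero => intro _; simp
  | succ m ih =>
    intro hm
    rw [List.range_succ, List.reverse_append]
    simp only [List.reverse_singleton, List.singleton_append, List.foldl_cons]
    have hstep : pvStepB g L
        (pvRunFrom g L (m + 1), (pvOver (pvRunFrom g L) (g.length - 1) (m + 1)).1,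
          g.getD (pvOver (pvRunFrom g L) (g.length - 1) (m + 1)).2 0) m
      = (pvRunFrom g L m, (pvOver (pvRunFrom g L) (g.length - 1) m).1,
          g.getD (pvOver (pvRunFrom g L) (g.length - 1) m).2 0) := by
      have hrun : (if g.getD (m + 1) 0 - g.getD m 0 = L then pvRunFrom g L (m + 1) + 1 else 1)
          = pvRunFrom g L m := by
        conv_rhs => rw [pvRunFrom]
        rw [dif_pos (by omega)]
        split
        · ring
        · rfl
      have hover : pvOver (pvRunFrom g L) (g.length - 1) m
          = if pvRunFrom g L m ≥ (pvOver (pvRunFrom g L) (g.length - 1) (m + 1)).1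
            then (pvRunFrom g L m, m) else pvOver (pvRunFrom g L) (g.length - 1) (m + 1) := by
        rw [pvOver, dif_pos (by omega)]
      simp only [pvStepB]
      rw [hrun, hover]
      by_cases hge : pvRunFrom g L m ≥ (pvOver (pvRunFrom g L) (g.length - 1) (m + 1)).1
      · rw [if_pos hge, if_pos hge]
      · rw [if_neg hge, if_neg hge]
    rw [hstep]
    exact ih (by omega)

theorem pv_core (g : List Int) (L : Int) :
    (if g.length < 2 then ((0 : Int), (0 : Int))
     else
       if (List.range (g.length - 1)).foldl (fun acc i => acc ++ [pvWhileA g L i 1 1]) [] = [] then (0, 0)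
       else
         ((PySem.List.max? ((List.range (g.length - 1)).foldl (fun acc i => acc ++ [pvWhileA g L i 1 1]) []) (fun y => y)).getD 0,
          g.getD ((PySem.List.index? ((List.range (g.length - 1)).foldl (fun acc i => acc ++ [pvWhileA g L i 1 1]) [])
            ((PySem.List.max? ((List.range (g.length - 1)).foldl (fun acc i => acc ++ [pvWhileA g L i 1 1]) []) (fun y => y)).getD 0)).getD 0) 0))
    = (if g.length < 2 then ((0 : Int), (0 : Int))
       else
         ((((List.range (g.length - 1)).reverse).foldl (pvStepB g L) (1, 0, 0)).2.1,
          (((List.range (g.length - 1)).reverse).foldl (pvStepB g L) (1, 0, 0)).2.2)) := by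
  by_cases hlen : g.length < 2
  · rw [if_pos hlen, if_pos hlen]
  · rw [if_neg hlen, if_neg hlen]
    have hn : 2 ≤ g.length := by omega
    have hM1 : 1 ≤ g.length - 1 := by omega
    have hlist : (List.range (g.length - 1)).foldl
        (fun acc i => acc ++ [pvWhileA g L i 1 1]) []
        = (List.range (g.length - 1)).map (pvRunFrom g L) := by
      rw [foldl_append_map]
      simp only [List.nil_append]
      exact List.map_congr_left (fun i _ => pvWhileA_one g L i)
    rw [hlist]
    have hne : (List.range (g.length - 1)).map (pvRunFrom g L) ≠ [] := by
      simp [List.map_eq_nil_iff, List.range_eq_nil]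
      omega
    rw [if_neg hne]
    obtain ⟨ha, hb, hc, hd, he⟩ := pvOver_props (pvRunFrom g L) (g.length - 1) 0 (by omega)
    -- A's max is the max value of pvOver
    have hmax : PySem.List.max? ((List.range (g.length - 1)).map (pvRunFrom g L)) (fun y => y)
        = some (pvOver (pvRunFrom g L) (g.length - 1) 0).1 := by
      rcases Option.isSome_iff_exists.mp (by
        rw [Option.isSome_iff_ne_none]
        intro hnone
        exact hne ((PySem.List.max?_eq_none_iff ((List.range (g.length - 1)).map (pvRunFrom g L)) (fun y => y)).mp hnone)) with ⟨w, hw⟩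
      have hwmem := PySem.List.max?_mem hw
      have hwmax := PySem.List.max?_isMax hw
      rw [hw]
      congr 1
      have h1 : w ≤ (pvOver (pvRunFrom g L) (g.length - 1) 0).1 := by
        rcases List.mem_map.mp hwmem with ⟨j, hj, rfl⟩
        exact hd j (by omega) (List.mem_range.mp hj)
      have h2 : (pvOver (pvRunFrom g L) (g.length - 1) 0).1 ≤ w := by
        have hmem : pvRunFrom g L (pvOver (pvRunFrom g L) (g.length - 1) 0).2
            ∈ (List.range (g.length - 1)).map (pvRunFrom g L) :=
          List.mem_map.mpr ⟨_, List.mem_range.mpr hb, rfl⟩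
        have := hwmax _ hmem
        simpa [hc] using this
      omega
    -- A's index is the leftmost argmax of pvOver
    have hidx : PySem.List.index? ((List.range (g.length - 1)).map (pvRunFrom g L))
        (pvOver (pvRunFrom g L) (g.length - 1) 0).1
        = some (pvOver (pvRunFrom g L) (g.length - 1) 0).2 := by
      have hklen : (pvOver (pvRunFrom g L) (g.length - 1) 0).2
          < ((List.range (g.length - 1)).map (pvRunFrom g L)).length := by
        simp only [List.length_map, List.length_range]
        exact hb
      refine index?_intro _ _ _ hklen ?_ ?_
      · simp only [List.getElem_map, List.getElem_range]
        exact hc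
      · intro j hj
        simp only [List.getElem_map, List.getElem_range]
        have := he j (by omega) hj
        omega
    rw [hmax]
    simp only [Option.getD_some]
    rw [hidx]
    simp only [Option.getD_some]
    -- B's fold: peel the first step, then the invariant
    have hrev : (List.range (g.length - 1)).reverse
        = (g.length - 2) :: (List.range (g.length - 2)).reverse := by
      have h2 : g.length - 1 = (g.length - 2) + 1 := by omega
      rw [h2, List.range_succ, List.reverse_append]
      simp
    rw [hrev]
    simp only [List.foldl_cons]
    have hfirst : pvStepB g L (1, 0, 0) (g.length - 2)
        = (pvRunFrom g L (g.length - 2),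
           (pvOver (pvRunFrom g L) (g.length - 1) (g.length - 2)).1,
           g.getD (pvOver (pvRunFrom g L) (g.length - 1) (g.length - 2)).2 0) := by
      have hrun : (if g.getD (g.length - 2 + 1) 0 - g.getD (g.length - 2) 0 = L
          then (1 : Int) + 1 else 1) = pvRunFrom g L (g.length - 2) := by
        by_cases hdm : g.getD (g.length - 2 + 1) 0 - g.getD (g.length - 2) 0 = L
        · rw [if_pos hdm]
          conv_rhs => rw [pvRunFrom]
          rw [dif_pos (by omega), if_pos hdm]
          conv_rhs => rw [pvRunFrom]
          rw [dif_neg (by omega)]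
        · rw [if_neg hdm]
          conv_rhs => rw [pvRunFrom]
          rw [dif_pos (by omega), if_neg hdm]
      have hover : pvOver (pvRunFrom g L) (g.length - 1) (g.length - 2)
          = (pvRunFrom g L (g.length - 2), g.length - 2) := by
        rw [pvOver, dif_neg (by omega)]
      simp only [pvStepB]
      rw [hrun, hover]
      rw [if_pos (by
        have h1 : (1 : Int) ≤ pvRunFrom g L (g.length - 2) := pvRunFrom_ge_one g L (g.length - 2)
        omega)]
    rw [hfirst]
    have hinv := foldB_inv g L hn (g.length - 2) (by omega)
    rw [hinv]

theorem detect_repeat_per_remainder_spec : Claim_equal_detect_repeat_per_remainder := by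
  intro indices repeat_length overlap remainder _ _
  exact pv_core (indices.filter (fun i => PySem.Int.mod i (repeat_length - overlap) == remainder)) repeat_length
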